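-- pv_equiv track=rewrite | github.com/CharlesDdev/genAI-coding-questions | grok-lvl2-ex6.py | middle_char
-- ===== SOURCE A (Python) =====
-- def middle_char(words):
--     string_length = 0
--     for char in words:
--         string_length += 1 # counts length
--     if string_length == 0: # edge case
--         return ""
--     if string_length % 2 == 0:
--         middle_pos = (string_length // 2) - 1 # first of two middles
--     else:
--         middle_pos = string_length // 2 # exact middle
--     pos = 0
--     for char in words:
--         if pos == middle_pos:
--             return char
--         pos += 1
--     return ""
-- ===== SOURCE B (Python) =====
-- def middle_char(words):
--     n = len(words)
--     if n == 0:
--         return ""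
--     return words[n // 2 - 1] if n % 2 == 0 else words[n // 2]
-- ===== Notes on version B (the rewrite author's own statement) =====
-- stated objective: simpler
-- what changed: Replaces the counting loop and the linear scanning loop with len() and direct O(1) indexing (first-of-two-middles kept for even lengths).
import Mathlib
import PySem

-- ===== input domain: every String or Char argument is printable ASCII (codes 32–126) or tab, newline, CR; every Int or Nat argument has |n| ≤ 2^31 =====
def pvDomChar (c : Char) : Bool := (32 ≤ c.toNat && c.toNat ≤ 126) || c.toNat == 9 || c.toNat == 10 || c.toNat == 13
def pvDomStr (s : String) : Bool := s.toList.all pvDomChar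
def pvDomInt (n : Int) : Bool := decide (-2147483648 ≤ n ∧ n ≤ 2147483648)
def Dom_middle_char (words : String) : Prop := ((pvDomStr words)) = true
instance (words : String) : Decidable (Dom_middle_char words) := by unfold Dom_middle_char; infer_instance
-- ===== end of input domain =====

-- B replaces A's counting loop and scanning loop with len() and direct indexing (simpler, O(1) after len).

-- ===== PORT A =====
-- second loop of A: scan with running position, return the char at middle_pos
def middleCharScan : List Char → Int → Int → String
  | [], _, _ => ""
  | c :: rest, pos, mid => if pos = mid then String.ofList [c] else middleCharScan rest (pos + 1) mid

def middle_char (words : String) : String :=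
  let n : Int := words.toList.foldl (fun acc _ => acc + 1) 0
  if n = 0 then ""
  else
    let mid : Int := if PySem.Int.mod n 2 = 0 then PySem.Int.floordiv n 2 - 1
                     else PySem.Int.floordiv n 2
    middleCharScan words.toList 0 mid

-- ===== PORT B =====
def middle_char_alt (words : String) : String :=
  let n : Int := PySem.Str.len words
  if n = 0 then ""
  else
    let i : Int := if PySem.Int.mod n 2 = 0 then PySem.Int.floordiv n 2 - 1
                   else PySem.Int.floordiv n 2
    -- words[i]; i is always in range here, the none branch is unreachable (totality guard)
    match PySem.Str.pyGet? words i with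
    | some c => String.ofList [c]
    | none => ""

-- ===== PRECONDITION & SPEC =====
def Spec_middle_char (words : String) (out : String) : Prop := out = middle_char_alt words
instance (words : String) (out : String) : Decidable (Spec_middle_char words out) := by unfold Spec_middle_char; infer_instance

-- ===== CLAIM (what is proved, stated in full; the proofs are below) =====
def Claim_equal_middle_char : Prop := ∀ (words : String), Dom_middle_char words → Spec_middle_char words (middle_char words)

-- ===== LEMMAS AND PROOFS =====
lemma foldl_count (l : List Char) (a : Int) :
    l.foldl (fun acc _ => acc + 1) a = a + l.length := by
  induction l generalizing a with
  | nil => simp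
  | cons c rest ih => simp [List.foldl, ih]; omega

lemma scan_eq (l : List Char) : ∀ (pos mid : Int), pos ≤ mid →
    middleCharScan l pos mid =
      (match l[(mid - pos).toNat]? with
       | some c => String.ofList [c]
       | none => "") := by
  induction l with
  | nil => intro pos mid _; simp [middleCharScan]
  | cons c rest ih =>
    intro pos mid h
    by_cases hp : pos = mid
    · subst hp
      simp [middleCharScan]
    · have h1 : pos + 1 ≤ mid := by omega
      have h2 : (mid - pos).toNat = (mid - (pos + 1)).toNat + 1 := by omega
      simp [middleCharScan, hp, ih (pos + 1) mid h1, h2]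

-- ===== VERDICT =====
theorem middle_char_spec : Claim_equal_middle_char := by
  intro words _
  unfold Spec_middle_char middle_char middle_char_alt
  simp only [foldl_count, PySem.Str.len_eq, Int.zero_add]
  set l := words.toList with hl
  by_cases h0 : (l.length : Int) = 0
  · simp [h0]
  · have hlen : 0 < l.length := by omega
    simp only [h0, if_false]
    set mid : Int := if PySem.Int.mod (l.length : Int) 2 = 0
        then PySem.Int.floordiv (l.length : Int) 2 - 1
        else PySem.Int.floordiv (l.length : Int) 2 with hmid
    have hfd : PySem.Int.floordiv (l.length : Int) 2 = (l.length : Int) / 2 := by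
      simp [PySem.Int.floordiv, Int.fdiv_eq_ediv]
    have hmod : PySem.Int.mod (l.length : Int) 2 = (l.length : Int) % 2 := by
      simp [PySem.Int.mod, Int.fmod_eq_emod]
    have hrange : 0 ≤ mid ∧ mid < (l.length : Int) := by
      rw [hmid, hfd, hmod]
      split <;> omega
    rw [scan_eq l 0 mid hrange.1]
    have : PySem.Str.pyGet? words mid = l[mid.toNat]? := by
      rw [PySem.Str.pyGet?_eq, PySem.Chars.pyGet?_eq_listPyGet?, ← hl,
        PySem.List.pyGet?_of_nonneg l hrange.1]
    rw [this]
    simp
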